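-- pv_equiv track=rewrite | github.com/pypi-data/pypi-mirror-390 | packages/os-normalizer/os_normalizer-0.5.1.tar.gz/os_normalizer-0.5.1/os_normalizer/parsers/bsd.py | _channel_preceded_by_os
-- ===== SOURCE A (Python) =====
-- def _channel_preceded_by_os(text: str, idx: int) -> bool:
--     """Ignore matches where the preceding token is the literal 'os' (e.g., 'os-release')."""
--     pos = idx - 1
--     letters: list[str] = []
--     while pos >= 0 and text[pos].isalpha():
--         letters.append(text[pos].lower())
--         pos -= 1
--     if not letters:
--         return False
--     prefix = "".join(reversed(letters))
--     return prefix == "os"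
-- ===== SOURCE B (Python) =====
-- def _channel_preceded_by_os(text: str, idx: int) -> bool:
--     """Ignore matches where the preceding token is the literal 'os' (e.g., 'os-release')."""
--     if idx < 2:
--         return False
--     # the preceding alphabetic run equals 'os' iff the two chars before idx are
--     # 'o','s' (case-insensitively) and the char before them (if any) is not alphabetic
--     return (text[idx - 1].lower() == 's'
--             and text[idx - 2].lower() == 'o'
--             and (idx < 3 or not text[idx - 3].isalpha()))
-- ===== Notes on version B (the rewrite author's own statement) =====
-- stated objective: faster
-- what changed: Replaced the backward accumulate-letters-then-join-and-compare loop with a constant-time inspection of the two characters before idx plus a boundary check on the character before them.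
import Mathlib
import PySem

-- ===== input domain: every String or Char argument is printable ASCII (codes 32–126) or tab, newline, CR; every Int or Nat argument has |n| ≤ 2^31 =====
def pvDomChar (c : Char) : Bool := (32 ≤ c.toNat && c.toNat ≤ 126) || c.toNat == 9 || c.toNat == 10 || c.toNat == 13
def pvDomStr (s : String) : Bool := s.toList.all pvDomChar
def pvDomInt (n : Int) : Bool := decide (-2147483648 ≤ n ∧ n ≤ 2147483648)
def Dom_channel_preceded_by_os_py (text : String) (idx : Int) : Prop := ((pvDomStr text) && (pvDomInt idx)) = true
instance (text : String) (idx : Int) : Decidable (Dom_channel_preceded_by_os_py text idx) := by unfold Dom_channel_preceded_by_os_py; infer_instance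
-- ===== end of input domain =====

-- B replaces A's backward accumulate-and-compare loop by a constant-time check of the
-- two characters before idx and the boundary character before them (objective: faster).

-- ===== PORT A =====
-- while pos >= 0 and text[pos].isalpha(): letters.append(text[pos].lower()); pos -= 1
def pvALoop (text : List Char) (pos : Int) (letters : List Char) : List Char :=
  if 0 ≤ pos then
    match PySem.List.pyGet? text pos with
    | some c =>
        if PySem.Chars.isalpha c then
          pvALoop text (pos - 1) (letters ++ [PySem.Chars.lowerChar c])
        else letters
    | none => letters  -- Python raises IndexError here; excluded by Pre_
  else letters
termination_by (pos + 1).toNat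
decreasing_by omega

def channel_preceded_by_os_py (text : String) (idx : Int) : Bool :=
  let letters := pvALoop text.toList (idx - 1) []
  if letters = [] then false
  else String.ofList letters.reverse == "os"

-- ===== PORT B =====
def channel_preceded_by_os_py_alt (text : String) (idx : Int) : Bool :=
  if idx < 2 then false
  else
    match PySem.List.pyGet? text.toList (idx - 1), PySem.List.pyGet? text.toList (idx - 2) with
    | some c1, some c2 =>
        (PySem.Chars.lowerChar c1 == 's') && (PySem.Chars.lowerChar c2 == 'o') &&
          (decide (idx < 3) || !(match PySem.List.pyGet? text.toList (idx - 3) with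
                                 | some c3 => PySem.Chars.isalpha c3
                                 | none => false))
    | _, _ => false  -- Python raises IndexError here; excluded by Pre_

-- ===== PRECONDITION & SPEC =====
-- A raises IndexError exactly when 1 ≤ idx and len(text) ≤ idx - 1, i.e. when idx > len(text).
def Pre_channel_preceded_by_os_py (text : String) (idx : Int) : Prop :=
  idx ≤ (text.length : Int)
instance (text : String) (idx : Int) : Decidable (Pre_channel_preceded_by_os_py text idx) := by
  unfold Pre_channel_preceded_by_os_py; infer_instance

def pvWitness_channel_preceded_by_os_py : String × Int := ("os-release", 2)

def Spec_channel_preceded_by_os_py (text : String) (idx : Int) (out : Bool) : Prop := out = channel_preceded_by_os_py_alt text idx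
instance (text : String) (idx : Int) (out : Bool) : Decidable (Spec_channel_preceded_by_os_py text idx out) := by unfold Spec_channel_preceded_by_os_py; infer_instance

-- ===== CLAIM (what is proved, stated in full; the proofs are below) =====
def Claim_equal_channel_preceded_by_os_py : Prop := ∀ (text : String) (idx : Int), Dom_channel_preceded_by_os_py text idx → Pre_channel_preceded_by_os_py text idx → Spec_channel_preceded_by_os_py text idx (channel_preceded_by_os_py text idx)


-- ===== LEMMAS AND PROOFS =====

lemma pvALoop_neg (text : List Char) (pos : Int) (acc : List Char) (h : pos < 0) :
    pvALoop text pos acc = acc := by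
  rw [pvALoop]; simp [not_le.mpr h]

lemma pyGet?_some (xs : List Char) (i : Int) (h0 : 0 ≤ i) (hl : i < (xs.length : Int)) :
    PySem.List.pyGet? xs i = some (xs[i.toNat]'(by omega)) := by
  simp [PySem.List.pyGet?, PySem.List.pyIdx?, h0, hl]

lemma pvALoop_none (text : List Char) (pos : Int) (acc : List Char)
    (h0 : 0 ≤ pos) (hc : PySem.List.pyGet? text pos = none) :
    pvALoop text pos acc = acc := by
  rw [pvALoop]; simp [h0, hc]

lemma pvALoop_acc_aux (text : List Char) :
    ∀ (n : Nat) (pos : Int) (acc : List Char), (pos + 1).toNat ≤ n →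
      pvALoop text pos acc = acc ++ pvALoop text pos [] := by
  intro n
  induction n with
  | zero =>
      intro pos acc h
      rw [pvALoop_neg _ _ _ (by omega), pvALoop_neg _ _ _ (by omega)]
      simp
  | succ n ih =>
      intro pos acc h
      by_cases h0 : 0 ≤ pos
      · cases hc : PySem.List.pyGet? text pos with
        | none => rw [pvALoop_none _ _ _ h0 hc, pvALoop_none _ _ _ h0 hc]; simp
        | some c =>
            by_cases ha : PySem.Chars.isalpha c = true
            · rw [pvALoop, pvALoop]
              simp only [hc, ha, if_pos]
              rw [ih (pos - 1) (acc ++ [PySem.Chars.lowerChar c]) (by omega),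
                  ih (pos - 1) ([] ++ [PySem.Chars.lowerChar c]) (by omega)]
              simp [h0]
            · rw [pvALoop, pvALoop]
              simp [h0, hc, ha]
      · rw [pvALoop_neg _ _ _ (by omega), pvALoop_neg _ _ _ (by omega)]
        simp

lemma pvALoop_acc (text : List Char) (pos : Int) (acc : List Char) :
    pvALoop text pos acc = acc ++ pvALoop text pos [] :=
  pvALoop_acc_aux text (pos + 1).toNat pos acc le_rfl

lemma pvALoop_step (text : List Char) (pos : Int) (c : Char)
    (h0 : 0 ≤ pos) (hc : PySem.List.pyGet? text pos = some c) :
    pvALoop text pos [] =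
      if PySem.Chars.isalpha c then PySem.Chars.lowerChar c :: pvALoop text (pos - 1) [] else [] := by
  rw [pvALoop]
  simp [h0, hc]
  split
  · rw [pvALoop_acc]; simp
  · rfl

lemma alpha_of_lower_s (c : Char) (h : PySem.Chars.lowerChar c = 's') :
    PySem.Chars.isalpha c = true := by
  unfold PySem.Chars.lowerChar at h
  split at h
  · simp [PySem.Chars.isalpha, *]
  · subst h; decide

lemma alpha_of_lower_o (c : Char) (h : PySem.Chars.lowerChar c = 'o') :
    PySem.Chars.isalpha c = true := by
  unfold PySem.Chars.lowerChar at h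
  split at h
  · simp [PySem.Chars.isalpha, *]
  · subst h; decide

lemma ofList_eq_os (l : List Char) : (String.ofList l == "os") = (l == ['o','s']) := by
  by_cases h : l = ['o','s']
  · subst h; rfl
  · have : String.ofList l ≠ "os" := by
      intro hh
      exact h (by simpa using congrArg String.toList hh)
    simp [h, this]

-- ===== VERDICT (by name: the statement is the Claim_ definition above) =====
theorem channel_preceded_by_os_py_spec : Claim_equal_channel_preceded_by_os_py := by
  intro text idx _ hpre
  unfold Spec_channel_preceded_by_os_py Pre_channel_preceded_by_os_py at *
  unfold channel_preceded_by_os_py channel_preceded_by_os_py_alt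
  by_cases h2 : idx < 2
  · simp only [if_pos h2]
    by_cases h1 : idx - 1 < 0
    · simp [pvALoop_neg text.toList (idx - 1) [] h1]
    · -- idx = 1, pos = 0
      have hidx : idx = 1 := by omega
      subst hidx
      by_cases hlen : (0 : Int) < (text.toList.length : Int)
      · have hc := pyGet?_some text.toList 0 (by omega) hlen
        rw [show (1 : Int) - 1 = 0 from rfl, pvALoop_step _ _ _ (by omega) hc]
        split
        · rw [pvALoop_neg _ _ _ (by omega)]
          simp [ofList_eq_os]
        · simp
      · have hn : PySem.List.pyGet? text.toList 0 = none := by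
          have h0 : text.toList.length = 0 := by omega
          simp [PySem.List.pyGet?, PySem.List.pyIdx?, h0]
        rw [show (1 : Int) - 1 = 0 from rfl, pvALoop_none _ _ _ le_rfl hn]
        simp
  · -- idx ≥ 2, idx ≤ len
    have hlen : idx ≤ (text.toList.length : Int) := hpre
    have hc1 := pyGet?_some text.toList (idx - 1) (by omega) (by omega)
    have hc2 := pyGet?_some text.toList (idx - 2) (by omega) (by omega)
    simp only [if_neg h2, hc1, hc2]
    rw [pvALoop_step _ _ _ (by omega) hc1, show idx - 1 - 1 = idx - 2 from by ring]
    set c1 := text.toList[(idx - 1).toNat]'(by omega) with hc1def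
    set c2 := text.toList[(idx - 2).toNat]'(by omega) with hc2def
    by_cases ha1 : PySem.Chars.isalpha c1 = true
    · rw [if_pos ha1, pvALoop_step _ _ _ (by omega) hc2,
          show idx - 2 - 1 = idx - 3 from by ring]
      by_cases ha2 : PySem.Chars.isalpha c2 = true
      · rw [if_pos ha2]
        by_cases h3 : idx < 3
        · have : idx - 3 < 0 := by omega
          rw [pvALoop_neg _ _ _ this]
          simp [ofList_eq_os, h3, Bool.and_comm]
        · have hc3 := pyGet?_some text.toList (idx - 3) (by omega) (by omega)
          rw [pvALoop_step _ _ _ (by omega) hc3]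
          set c3 := text.toList[(idx - 3).toNat]'(by omega) with hc3def
          by_cases ha3 : PySem.Chars.isalpha c3 = true
          · rw [if_pos ha3]
            simp only [hc3, ha3]
            have hfalse : ((PySem.Chars.lowerChar c1 ::
                PySem.Chars.lowerChar c2 ::
                PySem.Chars.lowerChar c3 :: pvALoop text.toList (idx - 3 - 1) []).reverse
                  == ['o','s']) = false := by
              rw [beq_eq_false_iff_ne]
              intro hh
              have := congrArg List.length hh
              simp at this
            simp only [ofList_eq_os, hfalse]
            simp [h3]
          · rw [if_neg ha3]
            simp only [hc3]
            simp [ofList_eq_os, h3, ha3, Bool.and_comm]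
      · rw [if_neg ha2]
        have : (PySem.Chars.lowerChar c2 == 'o') = false := by
          rcases hb : PySem.Chars.lowerChar c2 == 'o' with _ | _
          · rfl
          · exact absurd (alpha_of_lower_o c2 (by simpa using hb)) ha2
        simp [ofList_eq_os, this]
    · rw [if_neg ha1]
      have : (PySem.Chars.lowerChar c1 == 's') = false := by
        rcases hb : PySem.Chars.lowerChar c1 == 's' with _ | _
        · rfl
        · exact absurd (alpha_of_lower_s c1 (by simpa using hb)) ha1
      simp [this]
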